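-- pv_equiv track=rewrite | github.com/upesacm/100DaysOfCode-2025 | DSA/Sakshi_Kumari_590012344/Day_65/Question2.py | max_chain_length
-- ===== SOURCE A (Python) =====
-- def max_chain_length(pairs):
--     pairs.sort(key=lambda x: x[1])
--     count = 0
--     last_end = float('-inf')
--     for a, b in pairs:
--         if a > last_end:
--             count += 1
--             last_end = b
--     return count
-- ===== SOURCE B (Python) =====
-- def max_chain_length(pairs):
--     pairs.sort(key=lambda x: x[1])  # same in-place sort as A (side effect preserved)
--     dp = []  # (length of best chain ending at pair i, end of pair i)
--     for a, b in pairs: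
--         best = 0
--         for d, e in dp:
--             if e < a and d > best:
--                 best = d
--         dp.append((best + 1, b))
--     return max((d for d, _ in dp), default=0)
-- ===== Notes on version B (the rewrite author's own statement) =====
-- stated objective: alternative
-- what changed: replaces A's single greedy scan (count + last_end) over the end-sorted list by an O(n^2) LIS-style dynamic programme (dp[i] = 1 + max dp[j] over compatible j < i, answer = max dp), keeping the same in-place sort
import Mathlib
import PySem

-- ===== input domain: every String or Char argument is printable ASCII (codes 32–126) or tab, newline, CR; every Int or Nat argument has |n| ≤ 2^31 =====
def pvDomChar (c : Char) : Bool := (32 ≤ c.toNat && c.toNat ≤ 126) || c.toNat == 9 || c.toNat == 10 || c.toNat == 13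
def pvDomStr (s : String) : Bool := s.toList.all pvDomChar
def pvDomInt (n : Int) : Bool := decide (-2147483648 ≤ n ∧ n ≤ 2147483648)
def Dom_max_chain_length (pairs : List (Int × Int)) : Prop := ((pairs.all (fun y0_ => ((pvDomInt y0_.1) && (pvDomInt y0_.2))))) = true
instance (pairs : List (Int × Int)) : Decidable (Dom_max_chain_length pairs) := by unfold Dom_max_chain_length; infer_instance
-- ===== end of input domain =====

-- B replaces A's greedy scan by an O(n^2) LIS-style dynamic programme over the same end-sorted
-- list (objective: alternative, not faster). Both A and B sort `pairs` in place (same side effect);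
-- the equivalence proved here is about the return value.

-- ===== PORT A =====
-- greedy step: Python's `if a > last_end` with last_end starting at float('-inf');
-- last_end is modelled as Option Int, `none` = -inf (a > -inf is always true, exact for ints)
def pvGStep (s : Int × Option Int) (p : Int × Int) : Int × Option Int :=
  match s.2 with
  | none => (s.1 + 1, some p.2)
  | some v => if v < p.1 then (s.1 + 1, some p.2) else s

def max_chain_length (pairs : List (Int × Int)) : Int :=
  ((PySem.List.sorted pairs (fun x => x.2) false).foldl pvGStep (0, none)).1

-- ===== PORT B =====
-- inner scan: best = max dp value among already-processed pairs whose end < a (0 if none)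
def pvBestOf (D : List (Int × Int)) (a : Int) : Int :=
  D.foldl (fun acc de => if de.2 < a ∧ acc < de.1 then de.1 else acc) 0

def pvDStep (D : List (Int × Int)) (p : Int × Int) : List (Int × Int) :=
  D ++ [(pvBestOf D p.1 + 1, p.2)]

-- Python max(..., default=0) over the dp values
def pvMaxOf (D : List (Int × Int)) : Int :=
  match D with
  | [] => 0
  | x :: xs => xs.foldl (fun m de => max m de.1) x.1

def max_chain_length_alt (pairs : List (Int × Int)) : Int :=
  pvMaxOf ((PySem.List.sorted pairs (fun x => x.2) false).foldl pvDStep [])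

-- ===== PRECONDITION & SPEC =====
def Spec_max_chain_length (pairs : List (Int × Int)) (out : Int) : Prop := out = max_chain_length_alt pairs
instance (pairs : List (Int × Int)) (out : Int) : Decidable (Spec_max_chain_length pairs out) := by unfold Spec_max_chain_length; infer_instance

-- ===== CLAIM (what is proved, stated in full; the proofs are below) =====
def Claim_equal_max_chain_length : Prop := ∀ (pairs : List (Int × Int)), Dom_max_chain_length pairs → Spec_max_chain_length pairs (max_chain_length pairs)

-- ===== LEMMAS AND PROOFS =====

-- Invariant tying greedy state (c, e) to the dp table D built so far:
-- every dp value is in [1, c], dp values of pairs ending strictly before the greedy's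
-- last end are < c, and the greedy's last taken pair is in D with dp value exactly c.
def pvInv (c : Int) (e : Option Int) (D : List (Int × Int)) : Prop :=
  match e with
  | none => c = 0 ∧ D = []
  | some v => (∀ de ∈ D, 1 ≤ de.1 ∧ de.1 ≤ c ∧ (de.2 < v → de.1 < c)) ∧ (c, v) ∈ D

lemma pvBestOf_aux_le {c a : Int} (D : List (Int × Int)) (m : Int) (hm : m ≤ c)
    (h : ∀ de ∈ D, de.2 < a → de.1 ≤ c) :
    D.foldl (fun acc de => if de.2 < a ∧ acc < de.1 then de.1 else acc) m ≤ c := by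
  induction D generalizing m with
  | nil => simpa using hm
  | cons d t ih =>
    simp only [List.foldl_cons]
    split_ifs with hd
    · exact ih _ (h d (by simp) hd.1) (fun de hde => h de (by simp [hde]))
    · exact ih _ hm (fun de hde => h de (by simp [hde]))

lemma pvBestOf_le {c a : Int} (D : List (Int × Int)) (hc : 0 ≤ c)
    (h : ∀ de ∈ D, de.2 < a → de.1 ≤ c) : pvBestOf D a ≤ c :=
  pvBestOf_aux_le D 0 hc h

lemma pvBestOf_aux_ge_init {a : Int} (D : List (Int × Int)) (m : Int) :
    m ≤ D.foldl (fun acc de => if de.2 < a ∧ acc < de.1 then de.1 else acc) m := by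
  induction D generalizing m with
  | nil => simp
  | cons d t ih =>
    simp only [List.foldl_cons]
    split_ifs with hd
    · exact le_trans (le_of_lt hd.2) (ih _)
    · exact ih _

lemma pvBestOf_aux_ge {a : Int} (D : List (Int × Int)) (m : Int) {de : Int × Int}
    (hmem : de ∈ D) (hlt : de.2 < a) :
    de.1 ≤ D.foldl (fun acc de => if de.2 < a ∧ acc < de.1 then de.1 else acc) m := by
  induction D generalizing m with
  | nil => cases hmem
  | cons d t ih =>
    simp only [List.foldl_cons]
    rcases List.mem_cons.mp hmem with h | h
    · subst h
      split_ifs with hd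
      · exact pvBestOf_aux_ge_init t _
      · have : ¬ m < de.1 := fun hlt' => hd ⟨hlt, hlt'⟩
        exact le_trans (not_lt.mp this) (pvBestOf_aux_ge_init t _)
    · split_ifs with hd <;> exact ih _ h

lemma pvBestOf_nonneg (D : List (Int × Int)) (a : Int) : 0 ≤ pvBestOf D a :=
  pvBestOf_aux_ge_init D 0

lemma pvBestOf_ge {a : Int} (D : List (Int × Int)) {de : Int × Int}
    (hmem : de ∈ D) (hlt : de.2 < a) : de.1 ≤ pvBestOf D a :=
  pvBestOf_aux_ge D 0 hmem hlt

lemma pvMaxOf_aux {c : Int} (xs : List (Int × Int)) (m : Int) (hm : m ≤ c)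
    (hub : ∀ x ∈ xs, x.1 ≤ c) (hw : m = c ∨ ∃ x ∈ xs, x.1 = c) :
    xs.foldl (fun m de => max m de.1) m = c := by
  induction xs generalizing m with
  | nil =>
    rcases hw with h | ⟨x, hx, _⟩
    · simpa using h
    · cases hx
  | cons x t ih =>
    simp only [List.foldl_cons]
    refine ih _ (max_le hm (hub x (by simp))) (fun y hy => hub y (by simp [hy])) ?_
    rcases hw with h | ⟨y, hy, hyc⟩
    · exact Or.inl (le_antisymm (max_le h.le (hub x (by simp))) (h ▸ le_max_left _ _))
    · rcases List.mem_cons.mp hy with h | h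
      · subst h; exact Or.inl (le_antisymm (max_le hm (hub y (by simp))) (hyc ▸ le_max_right _ _))
      · exact Or.inr ⟨y, h, hyc⟩

lemma pvMaxOf_eq {c : Int} (D : List (Int × Int))
    (hub : ∀ de ∈ D, de.1 ≤ c) (hw : ∃ de ∈ D, de.1 = c) : pvMaxOf D = c := by
  cases D with
  | nil => rcases hw with ⟨de, h, _⟩; cases h
  | cons x t =>
    unfold pvMaxOf
    refine pvMaxOf_aux t x.1 (hub x (by simp)) (fun y hy => hub y (by simp [hy])) ?_
    rcases hw with ⟨de, hde, hdec⟩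
    rcases List.mem_cons.mp hde with h | h
    · exact Or.inl (h ▸ hdec)
    · exact Or.inr ⟨de, h, hdec⟩

-- main loop correspondence
lemma pvMain : ∀ (l : List (Int × Int)) (c : Int) (e : Option Int) (D : List (Int × Int)),
    l.Pairwise (fun p q => p.2 ≤ q.2) →
    (∀ p ∈ l, ∀ de ∈ D, de.2 ≤ p.2) →
    pvInv c e D →
    (l.foldl pvGStep (c, e)).1 = pvMaxOf (l.foldl pvDStep D) := by
  intro l
  induction l with
  | nil =>
    intro c e D _ _ hinv
    simp only [List.foldl_nil]
    cases e with
    | none => obtain ⟨hc, hD⟩ := hinv; simp [hD, pvMaxOf, hc]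
    | some v =>
      obtain ⟨hub, hw⟩ := hinv
      exact (pvMaxOf_eq D (fun de hde => (hub de hde).2.1) ⟨(c, v), hw, rfl⟩).symm
  | cons p t ih =>
    intro c e D hpw hends hinv
    have hpwt : t.Pairwise (fun p q => p.2 ≤ q.2) := (List.pairwise_cons.mp hpw).2
    have hhead : ∀ q ∈ t, p.2 ≤ q.2 := (List.pairwise_cons.mp hpw).1
    simp only [List.foldl_cons]
    cases e with
    | none =>
      obtain ⟨hc, hD⟩ := hinv
      subst hc; subst hD
      have hg : pvGStep (0, none) p = (1, some p.2) := rfl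
      have hd : pvDStep [] p = [(1, p.2)] := by simp [pvDStep, pvBestOf]
      rw [hg, hd]
      refine ih 1 (some p.2) [(1, p.2)] hpwt ?_ ?_
      · intro q hq de hde
        simp only [List.mem_singleton] at hde
        subst hde; exact hhead q hq
      · refine ⟨?_, by simp⟩
        intro de hde
        simp only [List.mem_singleton] at hde
        subst hde; exact ⟨le_refl _, le_refl _, by omega⟩
    | some v =>
      obtain ⟨hub, hw⟩ := hinv
      have hc1 : 1 ≤ c := (hub (c, v) hw).1
      have hvp : v ≤ p.2 := hends p (by simp) (c, v) hw
      have hendsD : ∀ de ∈ D, de.2 ≤ p.2 := hends p (by simp)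
      by_cases hvt : v < p.1
      · -- greedy takes the pair; dp value of the new entry is exactly c + 1
        have hg : pvGStep (c, some v) p = (c + 1, some p.2) := by simp [pvGStep, hvt]
        have hbest : pvBestOf D p.1 = c := by
          refine le_antisymm (pvBestOf_le D (by omega) (fun de hde _ => (hub de hde).2.1)) ?_
          exact pvBestOf_ge D hw hvt
        rw [hg]
        refine ih (c + 1) (some p.2) (pvDStep D p) hpwt ?_ ?_
        · intro q hq de hde
          rcases List.mem_append.mp hde with h | h
          · exact le_trans (hendsD de h) (hhead q hq)
          · simp only [List.mem_singleton] at h; subst h; exact hhead q hq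
        · constructor
          · intro de hde
            rcases List.mem_append.mp hde with h | h
            · have := hub de h; exact ⟨this.1, by omega, by omega⟩
            · simp only [List.mem_singleton] at h; subst h
              exact ⟨by simp; omega, by simp [hbest], by simp⟩
          · rw [show (c + 1, p.2) = (pvBestOf D p.1 + 1, p.2) by rw [hbest]]
            exact List.mem_append_right _ (by simp)
      · -- greedy skips the pair; new dp value stays ≤ c and the witness is preserved
        have hg : pvGStep (c, some v) p = (c, some v) := by simp [pvGStep, hvt]
        have hbest : pvBestOf D p.1 ≤ c - 1 := by
          refine pvBestOf_le D (by omega) ?_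
          intro de hde hlt
          have := (hub de hde).2.2 (by omega)
          omega
        rw [hg]
        refine ih c (some v) (pvDStep D p) hpwt ?_ ?_
        · intro q hq de hde
          rcases List.mem_append.mp hde with h | h
          · exact le_trans (hendsD de h) (hhead q hq)
          · simp only [List.mem_singleton] at h; subst h; exact hhead q hq
        · constructor
          · intro de hde
            rcases List.mem_append.mp hde with h | h
            · exact hub de h
            · simp only [List.mem_singleton] at h; subst h
              refine ⟨by have := pvBestOf_nonneg D p.1; simp; omega, by simp; omega, ?_⟩
              intro hlt
              simp at hlt
              omega
          · exact List.mem_append_left _ hw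
      
-- ===== VERDICT (by name: the statement is the Claim_ definition above) =====
theorem max_chain_length_spec : Claim_equal_max_chain_length := by
  intro pairs _
  unfold Spec_max_chain_length max_chain_length max_chain_length_alt
  exact pvMain _ 0 none []
    (PySem.List.sorted_pairwise pairs (fun x => x.2))
    (by intro p _ de hde; cases hde)
    ⟨rfl, rfl⟩
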